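-- pv_equiv track=rewrite | github.com/luinor223/wumbus-world | display.py | check_local
-- ===== SOURCE A (Python) =====
-- def check_local(input_map, x, y):
--     neighbors = []
--     if x > 0:
--         neighbors.append((-1, 0))
--     if x < len(input_map) - 1:
--         neighbors.append((1, 0))
--     if y > 0:
--         neighbors.append((0, -1))
--     if y < len(input_map[0]) - 1:
--         neighbors.append((0, 1))
--
--     effects = []
--
--     for element in ('W', 'P', 'P_G', 'H_P'):
--         for neighbor in neighbors:
--             if input_map[x + neighbor[0]][y + neighbor[1]] == element:
--                 effects.append(element)
--
--     return effects
-- ===== SOURCE B (Python) =====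
-- def check_local(input_map, x, y):
--     order = ('W', 'P', 'P_G', 'H_P')
--     vals = []
--     if x > 0:
--         vals.append(input_map[x - 1][y])
--     if x < len(input_map) - 1:
--         vals.append(input_map[x + 1][y])
--     if y > 0:
--         vals.append(input_map[x][y - 1])
--     if y < len(input_map[0]) - 1:
--         vals.append(input_map[x][y + 1])
--     return sorted((v for v in vals if v in order), key=order.index)
-- ===== Notes on version B (the rewrite author's own statement) =====
-- stated objective: alternative
-- what changed: Replaces A's four per-element rescans of the neighbor list with a filter-then-stable-sort: collect the neighbor cell values once, keep only the hazard tokens, and stable-sort them by their priority index in ('W','P','P_G','H_P'), which reproduces A's element-major order.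
import Mathlib
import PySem

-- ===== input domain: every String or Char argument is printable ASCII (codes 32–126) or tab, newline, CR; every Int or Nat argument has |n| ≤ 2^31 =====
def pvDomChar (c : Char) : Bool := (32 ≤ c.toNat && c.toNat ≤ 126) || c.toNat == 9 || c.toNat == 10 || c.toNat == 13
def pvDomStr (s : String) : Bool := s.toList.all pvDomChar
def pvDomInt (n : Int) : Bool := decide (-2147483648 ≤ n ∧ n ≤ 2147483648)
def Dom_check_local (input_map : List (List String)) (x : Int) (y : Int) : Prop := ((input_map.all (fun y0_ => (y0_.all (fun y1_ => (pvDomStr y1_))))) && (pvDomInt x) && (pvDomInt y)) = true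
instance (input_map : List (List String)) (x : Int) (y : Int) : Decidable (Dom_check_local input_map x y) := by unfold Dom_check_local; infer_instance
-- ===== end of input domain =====

-- B replaces A's per-hazard-element rescans of the neighbor list by a filter-then-stable-sort
-- of the neighbor cell values under a priority key (alternative algorithm, same cost class).

-- shared cell accessor: input_map[i][j] with Python index semantics (the defaults are
-- only reachable outside Pre_check_local, where the Pythons raise IndexError)
def pyCell (input_map : List (List String)) (i j : Int) : Option String :=
  PySem.List.pyGet? ((PySem.List.pyGet? input_map i).getD []) j

-- ===== PORT A =====
def check_local (input_map : List (List String)) (x : Int) (y : Int) : List String :=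
  let neighbors : List (Int × Int) :=
    (if x > 0 then [((-1 : Int), (0 : Int))] else []) ++
    (if x < (input_map.length : Int) - 1 then [((1 : Int), (0 : Int))] else []) ++
    (if y > 0 then [((0 : Int), (-1 : Int))] else []) ++
    (if y < ((((PySem.List.pyGet? input_map 0).getD []).length : Int)) - 1 then [((0 : Int), (1 : Int))] else [])
  ["W", "P", "P_G", "H_P"].foldl (fun effects element =>
    neighbors.foldl (fun effects nb =>
      if pyCell input_map (x + nb.1) (y + nb.2) == some element then effects ++ [element]
      else effects) effects) []

-- ===== PORT B =====
-- the tuple ('W', 'P', 'P_G', 'H_P') of Source B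
def hazardOrder : List String := ["W", "P", "P_G", "H_P"]

-- order.index v; the default 0 is unreachable: the key is only applied to filtered values
def hazKey (v : String) : Int := (PySem.List.index? hazardOrder v).getD 0

def check_local_alt (input_map : List (List String)) (x : Int) (y : Int) : List String :=
  let vals : List String :=
    (if x > 0 then [(pyCell input_map (x - 1) y).getD ""] else []) ++
    (if x < (input_map.length : Int) - 1 then [(pyCell input_map (x + 1) y).getD ""] else []) ++
    (if y > 0 then [(pyCell input_map x (y - 1)).getD ""] else []) ++
    (if y < ((((PySem.List.pyGet? input_map 0).getD []).length : Int)) - 1 then [(pyCell input_map x (y + 1)).getD ""] else [])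
  PySem.List.sorted (vals.filter (fun v => hazardOrder.contains v)) hazKey

-- ===== PRECONDITION & SPEC =====
-- the access input_map[i][j] does not raise (Python index semantics, negative wrap allowed)
def okCell (input_map : List (List String)) (i j : Int) : Bool :=
  match PySem.List.pyGet? input_map i with
  | some row => decide (PySem.Raise.InRange row.length j)
  | none => false

-- Pre_ excludes exactly the inputs where the Python raises IndexError: the empty map
-- (len(input_map[0])) and any guarded neighbor access that is out of range.
def Pre_check_local (input_map : List (List String)) (x : Int) (y : Int) : Prop :=
  input_map ≠ [] ∧
  (x > 0 → okCell input_map (x - 1) y = true) ∧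
  (x < (input_map.length : Int) - 1 → okCell input_map (x + 1) y = true) ∧
  (y > 0 → okCell input_map x (y - 1) = true) ∧
  (y < (((input_map.headD []).length : Int)) - 1 → okCell input_map x (y + 1) = true)
instance (input_map : List (List String)) (x : Int) (y : Int) : Decidable (Pre_check_local input_map x y) := by unfold Pre_check_local; infer_instance

def pvWitness_check_local : List (List String) × Int × Int := ([["W", "P"], ["H_P", "E"]], 0, 0)

def Spec_check_local (input_map : List (List String)) (x : Int) (y : Int) (out : List String) : Prop := out = check_local_alt input_map x y
instance (input_map : List (List String)) (x : Int) (y : Int) (out : List String) : Decidable (Spec_check_local input_map x y out) := by unfold Spec_check_local; infer_instance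

-- ===== CLAIM (what is proved, stated in full; the proofs are below) =====
def Claim_equal_check_local : Prop := ∀ (input_map : List (List String)) (x : Int) (y : Int), Dom_check_local input_map x y → Pre_check_local input_map x y → Spec_check_local input_map x y (check_local input_map x y)

-- ===== LEMMAS AND PROOFS =====

-- comparing a cell with a nonempty element string can go through the "" default
lemma beq_some_eq_getD (o : Option String) (e : String) (he : e ≠ "") :
    (o == some e) = ((o.getD "") == e) := by
  cases o with
  | none => simp [Ne.symm he]
  | some a => simp

-- A's inner scan appends e once per matching neighbor: it builds the e-bucket of the values
lemma innerA (m : List (List String)) (x y : Int) (e : String) (he : e ≠ "")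
    (ns : List (Int × Int)) :
    ∀ (eff : List String),
      ns.foldl (fun eff nb =>
          if pyCell m (x + nb.1) (y + nb.2) == some e then eff ++ [e] else eff) eff
      = eff ++ (ns.map (fun nb => (pyCell m (x + nb.1) (y + nb.2)).getD "")).filter (· == e) := by
  induction ns with
  | nil => intro eff; simp
  | cons nb rest ih =>
    intro eff
    rw [List.foldl_cons, beq_some_eq_getD _ _ he, List.map_cons, List.filter_cons]
    by_cases h : ((pyCell m (x + nb.1) (y + nb.2)).getD "") = e
    · rw [if_pos (by simp [h]), ih]; simp [h]
    · rw [if_neg (by simp [h]), ih]; simp [h]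

-- insertBy walks past a block it does not insert before
lemma insertBy_skip (before : String → String → Bool) (x : String) (ys zs : List String)
    (h : ∀ y ∈ ys, before x y = false) :
    PySem.List.insertBy before x (ys ++ zs) = ys ++ PySem.List.insertBy before x zs := by
  induction ys with
  | nil => simp
  | cons y ys ih =>
    simp only [List.cons_append, PySem.List.insertBy, h y (by simp)]
    simp only [Bool.false_eq_true, if_false, List.cons.injEq, true_and]
    exact ih (fun y hy => h y (by simp [hy]))

-- insertBy puts x in front of a block it inserts before everywhere
lemma insertBy_front (before : String → String → Bool) (x : String) (zs : List String)
    (h : ∀ z ∈ zs, before x z = true) :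
    PySem.List.insertBy before x zs = x :: zs := by
  cases zs with
  | nil => rfl
  | cons z zs => simp [PySem.List.insertBy, h z (by simp)]

-- every element of an e-bucket is e
lemma mem_filter_beq (L : List String) (e v : String) (h : v ∈ L.filter (· == e)) : v = e := by
  have := (List.mem_filter.mp h).2; simpa using this

-- the stable sort by hazard priority of the hazard values IS the four buckets in order
lemma sorted_buckets (L : List String) :
    PySem.List.sorted (L.filter (fun v => hazardOrder.contains v)) hazKey
    = L.filter (· == "W") ++ L.filter (· == "P") ++ L.filter (· == "P_G") ++ L.filter (· == "H_P") := by
  induction L using List.reverseRecOn with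
  | nil => rfl
  | append_singleton L a ih =>
    rw [PySem.List.sorted_eq_foldl_insertBy] at *
    simp only [List.filter_append, List.foldl_append]
    rw [ih]
    by_cases ha : hazardOrder.contains a = true
    · have hcases : a = "W" ∨ a = "P" ∨ a = "P_G" ∨ a = "H_P" := by
        simpa [hazardOrder] using ha
      have hW : ∀ v ∈ L.filter (· == "W"), v = "W" := fun v hv => mem_filter_beq L _ v hv
      have hP : ∀ v ∈ L.filter (· == "P"), v = "P" := fun v hv => mem_filter_beq L _ v hv
      have hG : ∀ v ∈ L.filter (· == "P_G"), v = "P_G" := fun v hv => mem_filter_beq L _ v hv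
      have hH : ∀ v ∈ L.filter (· == "H_P"), v = "H_P" := fun v hv => mem_filter_beq L _ v hv
      rcases hcases with h | h | h | h <;> subst h
      · rw [List.filter_singleton, ha]
        simp only [cond_true, List.foldl_cons, List.foldl_nil, List.append_assoc]
        rw [insertBy_skip _ _ _ _ (fun v hv => by rw [hW v hv]; rfl)]
        rw [insertBy_front _ _ _ (fun z hz => by
          rcases List.mem_append.mp hz with hz | hz
          · rw [hP z hz]; rfl
          · rcases List.mem_append.mp hz with hz | hz
            · rw [hG z hz]; rfl
            · rw [hH z hz]; rfl)]
        simp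
      · rw [List.filter_singleton, ha]
        simp only [cond_true, List.foldl_cons, List.foldl_nil, List.append_assoc]
        rw [← List.append_assoc (L.filter (· == "W")) (L.filter (· == "P"))]
        rw [insertBy_skip _ _ _ _ (fun v hv => by
          rcases List.mem_append.mp hv with hv | hv
          · rw [hW v hv]; rfl
          · rw [hP v hv]; rfl)]
        rw [insertBy_front _ _ _ (fun z hz => by
          rcases List.mem_append.mp hz with hz | hz
          · rw [hG z hz]; rfl
          · rw [hH z hz]; rfl)]
        simp
      · rw [List.filter_singleton, ha]
        simp only [cond_true, List.foldl_cons, List.foldl_nil, List.append_assoc]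
        rw [← List.append_assoc (L.filter (· == "P")) (L.filter (· == "P_G")),
            ← List.append_assoc (L.filter (· == "W"))]
        rw [insertBy_skip _ _ _ _ (fun v hv => by
          rcases List.mem_append.mp hv with hv | hv
          · rw [hW v hv]; rfl
          · rcases List.mem_append.mp hv with hv | hv
            · rw [hP v hv]; rfl
            · rw [hG v hv]; rfl)]
        rw [insertBy_front _ _ _ (fun z hz => by rw [hH z hz]; rfl)]
        simp
      · rw [List.filter_singleton, ha]
        simp only [cond_true, List.foldl_cons, List.foldl_nil]
        rw [PySem.List.insertBy_of_forall_not_before _ _ _ (fun v hv => by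
          rcases List.mem_append.mp hv with hv | hv
          · rcases List.mem_append.mp hv with hv | hv
            · rcases List.mem_append.mp hv with hv | hv
              · rw [hW v hv]; rfl
              · rw [hP v hv]; rfl
            · rw [hG v hv]; rfl
          · rw [hH v hv]; rfl)]
        simp
    · have hne : ∀ e ∈ hazardOrder, ¬ (a = e) := by
        intro e he hae; exact ha (by subst hae; simpa using he)
      rw [Bool.not_eq_true] at ha
      rw [List.filter_singleton, ha]
      simp only [cond_false, List.foldl_nil]
      have h1 : ¬ (a = "W") := hne _ (by simp [hazardOrder])
      have h2 : ¬ (a = "P") := hne _ (by simp [hazardOrder])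
      have h3 : ¬ (a = "P_G") := hne _ (by simp [hazardOrder])
      have h4 : ¬ (a = "H_P") := hne _ (by simp [hazardOrder])
      simp [h1, h2, h3, h4]

theorem check_local_spec : Claim_equal_check_local := by
  intro m x y _ _
  unfold Spec_check_local check_local check_local_alt
  simp only [List.foldl_cons, List.foldl_nil,
    innerA m x y "W" (by decide), innerA m x y "P" (by decide),
    innerA m x y "P_G" (by decide), innerA m x y "H_P" (by decide),
    sorted_buckets,
    List.map_append, apply_ite (List.map (fun nb : Int × Int => (pyCell m (x + nb.1) (y + nb.2)).getD "")),
    List.map_cons, List.map_nil]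
  norm_num [show x + (-1 : Int) = x - 1 from by ring, show y + (-1 : Int) = y - 1 from by ring]
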